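-- pv_equiv track=rewrite | github.com/maxippacheco/aed2024 | tpl_1/tpl_5.py | evensublist
-- ===== SOURCE A (Python) =====
-- def list_is_even(L: list):
-- 	for num in L:
-- 		if num % 2 != 0:
-- 			return False
-- 	return True
--
-- def evensublist(L: list):
-- 	max_sublist = []
--
-- 	for i in range(len(L)):
-- 		for j in range(i+1, len(L)+1):
-- 			sublist = L[i:j]
-- 			if list_is_even(sublist) and len(sublist) > len(max_sublist):
-- 				max_sublist = sublist
-- 	return max_sublist
-- ===== SOURCE B (Python) =====
-- def evensublist(L: list):
-- 	best = []
-- 	cur = []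
-- 	for x in L:
-- 		if x % 2 == 0:
-- 			cur = cur + [x]
-- 			if len(cur) > len(best):
-- 				best = cur
-- 		else:
-- 			cur = []
-- 	return best
-- ===== Notes on version B (the rewrite author's own statement) =====
-- stated objective: faster
-- what changed: Replaces A's enumeration of every O(n^2) slice with a full rescan of each by a single left-to-right pass that grows the current even run and keeps the first strictly longest one.
import Mathlib
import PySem

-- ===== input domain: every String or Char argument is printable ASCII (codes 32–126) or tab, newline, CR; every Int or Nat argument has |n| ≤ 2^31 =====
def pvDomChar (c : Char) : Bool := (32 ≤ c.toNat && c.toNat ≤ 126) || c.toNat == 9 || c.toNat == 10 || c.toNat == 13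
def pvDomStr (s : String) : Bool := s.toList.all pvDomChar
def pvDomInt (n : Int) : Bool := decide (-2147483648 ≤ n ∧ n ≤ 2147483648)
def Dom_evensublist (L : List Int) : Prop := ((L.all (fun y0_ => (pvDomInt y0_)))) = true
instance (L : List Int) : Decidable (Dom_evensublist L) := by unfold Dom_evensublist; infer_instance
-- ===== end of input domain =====

-- B replaces A's enumerate-every-slice-and-rescan search (O(n^3)) with one left-to-right pass
-- growing the current even run and keeping the first strictly longest one.

-- ===== PORT A =====
-- literal port of list_is_even: scan, early False on an odd element
def listIsEven : List Int → Bool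
  | [] => true
  | num :: t => if PySem.Int.mod num 2 != 0 then false else listIsEven t

-- literal port of A: for i in range(len(L)): for j in range(i+1, len(L)+1): take slice, keep if all-even and strictly longer
def evensublist (L : List Int) : List Int :=
  (PySem.List.pyRange 0 (L.length : Int) 1).foldl (fun max_sublist i =>
    (PySem.List.pyRange (i + 1) ((L.length : Int) + 1) 1).foldl (fun ms j =>
      let sublist := PySem.List.slice L (some i) (some j)
      if listIsEven sublist && decide (ms.length < sublist.length) then sublist else ms)
      max_sublist) []

-- ===== PORT B =====
-- literal port of Source B: one pass, cur = current even run, best = first longest run seen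
def evensublist_alt (L : List Int) : List Int :=
  (L.foldl (fun (s : List Int × List Int) x =>
      if PySem.Int.mod x 2 == 0 then
        let cur := s.2 ++ [x]
        (if s.1.length < cur.length then cur else s.1, cur)
      else (s.1, [])) ([], [])).1

-- ===== PRECONDITION & SPEC =====
def Spec_evensublist (L : List Int) (out : List Int) : Prop := out = evensublist_alt L
instance (L : List Int) (out : List Int) : Decidable (Spec_evensublist L out) := by unfold Spec_evensublist; infer_instance

-- ===== CLAIM (what is proved, stated in full; the proofs are below) =====
def Claim_equal_evensublist : Prop := ∀ (L : List Int), Dom_evensublist L → Spec_evensublist L (evensublist L)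

-- ===== LEMMAS AND PROOFS =====

-- evenness test used by both programs
def ev (x : Int) : Bool := PySem.Int.mod x 2 == 0

-- "keep the challenger only if strictly longer" (first longest wins ties)
def upd (b c : List Int) : List Int := if b.length < c.length then c else b

-- common intermediate form: fold over all start positions, candidate = maximal even run there
def g (L ms : List Int) : List Int :=
  (List.range L.length).foldl (fun ms k => upd ms ((L.drop k).takeWhile ev)) ms

lemma listIsEven_eq (l : List Int) : listIsEven l = l.all ev := by
  induction l with
  | nil => rfl
  | cons x t ih =>
    have h : (PySem.Int.mod x 2 != 0) = !(ev x) := rfl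
    cases hx : ev x <;>
      simp only [listIsEven, h, hx, Bool.not_false, Bool.not_true, Bool.false_eq_true, if_true, if_false, List.all_cons, Bool.false_and, Bool.true_and, ih]

lemma upd_no {b c : List Int} (h : c.length ≤ b.length) : upd b c = b := by
  simp [upd]; omega

lemma upd_le_len (b c : List Int) : c.length ≤ (upd b c).length := by
  unfold upd; split <;> omega

lemma upd_upd_append (ms c w : List Int) :
    upd (upd ms c) (c ++ w) = upd ms (c ++ w) := by
  unfold upd; simp only [List.length_append]
  by_cases h1 : ms.length < c.length
  · rw [if_pos h1]
    cases w with
    | nil => simp [h1]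
    | cons y ys =>
      have hw : 0 < (y :: ys).length := by simp
      rw [if_pos (by omega), if_pos (by omega)]
  · rw [if_neg h1]

lemma upd_upd_self (ms c : List Int) : upd (upd ms c) c = upd ms c := by
  simpa using upd_upd_append ms c []

lemma g_cons (x : Int) (t ms : List Int) :
    g (x :: t) ms = g t (upd ms ((x :: t).takeWhile ev)) := by
  unfold g
  simp only [List.length_cons, List.range_succ_eq_map, List.foldl_cons, List.foldl_map,
    List.drop_zero, List.drop_succ_cons]

lemma g_absorb (u ms : List Int) : g u (upd ms (u.takeWhile ev)) = g u ms := by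
  cases u with
  | nil => simp [g, upd_no]
  | cons y v => rw [g_cons, g_cons, upd_upd_self]

-- A's inner loop over j, generalized with the already-scanned even prefix `pre`
lemma inner_core (t : List Int) : ∀ (pre ms : List Int), pre.all ev = true → pre.length ≤ ms.length →
    (List.range t.length).foldl (fun ms k =>
        if (pre ++ t.take (k + 1)).all ev && decide (ms.length < (pre ++ t.take (k + 1)).length)
        then pre ++ t.take (k + 1) else ms) ms
      = upd ms (pre ++ t.takeWhile ev) := by
  induction t with
  | nil => intro pre ms hpre hlen; simp [upd_no hlen]
  | cons x u ih =>
    intro pre ms hpre hlen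
    cases hx : ev x with
    | true =>
      simp only [List.length_cons, List.range_succ_eq_map, List.foldl_cons, List.foldl_map,
        Nat.succ_eq_add_one]
      have step0 : (if ((pre ++ (x :: u).take (0 + 1)).all ev &&
            decide (ms.length < (pre ++ (x :: u).take (0 + 1)).length)) = true
          then pre ++ (x :: u).take (0 + 1) else ms) = upd ms (pre ++ [x]) := by
        simp [List.take_succ_cons, hpre, hx, upd]
      rw [step0]
      have hre : ∀ (k : Nat), pre ++ (x :: u).take (k + 1 + 1) = (pre ++ [x]) ++ u.take (k + 1) := by
        intro k; simp [List.take_succ_cons]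
      simp only [hre]
      rw [ih (pre ++ [x]) (upd ms (pre ++ [x]))
        (by simp [hpre, hx]) (by simpa using upd_le_len ms (pre ++ [x]))]
      rw [upd_upd_append]
      congr 1
      simp [hx]
    | false =>
      have hall : ∀ (k : Nat), (pre ++ (x :: u).take (k + 1)).all ev = false := by
        intro k; simp [List.take_succ_cons, hx]
      have htw : (x :: u).takeWhile ev = [] := by
        rw [List.takeWhile_cons]; simp [hx]
      simp only [hall, Bool.false_and, Bool.false_eq_true, if_false]
      rw [PySem.List.foldl_ignore, htw]
      simp [upd_no hlen]

-- A reduces to g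
lemma A_eq_g (L : List Int) : evensublist L = g L [] := by
  unfold evensublist g
  rw [show ((L.length : Int)) = (((L.length : Nat)) : Int) from rfl, PySem.List.pyRange_zero_nat]
  simp only [List.foldl_map]
  apply PySem.List.foldl_congr_mem
  intro ms k hk
  have hk' : k < L.length := List.mem_range.mp hk
  rw [PySem.List.pyRange_one]
  simp only [List.foldl_map]
  have hlen : (((L.length : Int) + 1) - ((k : Int) + 1)).toNat = (L.drop k).length := by
    rw [List.length_drop]; omega
  rw [hlen]
  have hcand : ∀ (d : Nat),
      PySem.List.slice L (some ((k : Int))) (some (((k : Int) + 1) + (d : Int)))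
      = (L.drop k).take (d + 1) := by
    intro d
    have h1 : (((k : Int) + 1) + (d : Int)) = ((k + 1 + d : Nat) : Int) := by push_cast; ring
    rw [h1, PySem.List.slice_natCast]
    congr 1; omega
  have hic := inner_core (L.drop k) [] ms (by simp) (by simp)
  simp only [List.nil_append] at hic
  rw [← hic]
  apply PySem.List.foldl_congr_mem
  intro acc d _
  rw [hcand d, listIsEven_eq]
  rfl


-- B reduces to g: fold with state (best, cur) where cur is the current (all-even) run
lemma bfold_eq (t : List Int) : ∀ best cur : List Int, cur.all ev = true → cur.length ≤ best.length →
    (t.foldl (fun (s : List Int × List Int) x =>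
        if PySem.Int.mod x 2 == 0 then
          (if s.1.length < (s.2 ++ [x]).length then s.2 ++ [x] else s.1, s.2 ++ [x])
        else (s.1, [])) (best, cur)).1
      = g t (upd best (cur ++ t.takeWhile ev)) := by
  induction t with
  | nil => intro best cur _ hlen; simp [g, upd_no hlen]
  | cons x u ih =>
    intro best cur hcur hlen
    cases hx : ev x with
    | true =>
      have hx' : (PySem.Int.mod x 2 == 0) = true := hx
      simp only [List.foldl_cons, hx', if_true]
      have hstep : (if best.length < (cur ++ [x]).length then cur ++ [x] else best)
          = upd best (cur ++ [x]) := rfl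
      rw [hstep, ih (upd best (cur ++ [x])) (cur ++ [x])
        (by simp [hcur, hx]) (upd_le_len best (cur ++ [x])), upd_upd_append]
      have hC : (cur ++ [x]) ++ u.takeWhile ev = cur ++ (x :: u).takeWhile ev := by
        simp [hx]
      rw [hC, g_cons, upd_no (le_trans
        (by simp : ((x :: u).takeWhile ev).length ≤ (cur ++ (x :: u).takeWhile ev).length)
        (upd_le_len best (cur ++ (x :: u).takeWhile ev)))]
    | false =>
      have hx' : (PySem.Int.mod x 2 == 0) = false := hx
      simp only [List.foldl_cons, hx', Bool.false_eq_true, if_false]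
      rw [ih best [] (by simp) (by simp)]
      simp only [List.nil_append]
      have htw : (x :: u).takeWhile ev = [] := by
        rw [List.takeWhile_cons]; simp [hx]
      rw [g_absorb, g_cons, htw]
      simp [upd_no hlen, upd_no (by simp : ([] : List Int).length ≤ best.length)]

lemma B_eq_g (L : List Int) : evensublist_alt L = g L [] := by
  unfold evensublist_alt
  rw [bfold_eq L [] [] (by simp) (by simp)]
  simpa using g_absorb L []

-- ===== VERDICT (by name: the statement is the Claim_ definition above) =====
theorem evensublist_spec : Claim_equal_evensublist := by
  intro L _
  unfold Spec_evensublist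
  rw [A_eq_g, B_eq_g]
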